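-- pv_equiv track=rewrite | github.com/yunn3/recursion-problems | 491-doubledArray/main.py | doubled_array_helper
-- ===== SOURCE A (Python) =====
-- def doubled_array_helper(arr: list[int], start: int, end: int) -> list[int]:
--     if start == end:
--         arr[start] *= 2
--
--     else:
--         mid = (start + end) // 2
--
--         doubled_array_helper(arr, start, mid)
--         doubled_array_helper(arr, mid + 1, end)
--
--     return arr
-- ===== SOURCE B (Python) =====
-- def doubled_array_helper(arr: list[int], start: int, end: int) -> list[int]:
--     arr[start] *= 2
--     while start < end:
--         start += 1
--         arr[start] *= 2
--     return arr
-- ===== Notes on version B (the rewrite author's own statement) =====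
-- stated objective: simpler
-- what changed: Replaces the divide-and-conquer halving recursion (mid = (start+end)//2, two recursive calls) with a flat do-while-style loop that doubles arr[start] and then advances start to end; same in-place mutation and returned reference, no recursion.
import Mathlib
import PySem

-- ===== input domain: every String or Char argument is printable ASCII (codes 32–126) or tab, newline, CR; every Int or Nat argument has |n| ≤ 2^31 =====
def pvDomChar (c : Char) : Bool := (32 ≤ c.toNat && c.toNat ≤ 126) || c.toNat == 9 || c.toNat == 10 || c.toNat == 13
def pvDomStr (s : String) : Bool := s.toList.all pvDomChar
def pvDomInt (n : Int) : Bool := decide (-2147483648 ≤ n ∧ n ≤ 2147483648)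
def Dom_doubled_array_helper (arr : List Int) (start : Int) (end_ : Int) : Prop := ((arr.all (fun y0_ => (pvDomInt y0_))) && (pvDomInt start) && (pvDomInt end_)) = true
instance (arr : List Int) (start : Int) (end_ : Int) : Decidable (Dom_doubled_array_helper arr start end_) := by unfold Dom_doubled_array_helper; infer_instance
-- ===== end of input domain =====

-- B replaces A's divide-and-conquer halving recursion with a flat do-while-style loop;
-- both Pythons mutate arr in place and return the same reference — the equivalence proved here is
-- about the return value.

-- ===== PORT A =====
-- 'arr[i] *= 2' : read arr[i] (Python IndexError = none, excluded by Pre_), write back its double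
def pvDblAt (arr : List Int) (i : Int) : List Int :=
  match PySem.List.pyGet? arr i with
  | some v => PySem.List.pySetD arr i (2 * v)
  | none => arr

-- fuel = recursion depth bound; Pre_ guarantees start ≤ end_, under which the supplied fuel suffices
def doubled_array_helper_rec (arr : List Int) (start end_ : Int) : Nat → List Int
  | 0 => arr
  | fuel + 1 =>
    if start = end_ then
      pvDblAt arr start
    else
      let mid := PySem.Int.floordiv (start + end_) 2
      let arr1 := doubled_array_helper_rec arr start mid fuel
      doubled_array_helper_rec arr1 (mid + 1) end_ fuel

def doubled_array_helper (arr : List Int) (start : Int) (end_ : Int) : List Int :=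
  doubled_array_helper_rec arr start end_ ((end_ - start).toNat + 1)

-- ===== PORT B =====
-- the 'while start < end' loop, state = (arr, start)
def pvWhileDbl (arr : List Int) (start end_ : Int) : List Int :=
  if start < end_ then pvWhileDbl (pvDblAt arr (start + 1)) (start + 1) end_ else arr
termination_by (end_ - start).toNat
decreasing_by omega

def doubled_array_helper_alt (arr : List Int) (start : Int) (end_ : Int) : List Int :=
  pvWhileDbl (pvDblAt arr start) start end_

-- ===== PRECONDITION & SPEC =====
-- Exactly the inputs where A returns: start > end_ makes A recurse forever (RecursionError),
-- and an index of [start, end_] outside [-len, len) raises IndexError.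
def Pre_doubled_array_helper (arr : List Int) (start : Int) (end_ : Int) : Prop :=
  start ≤ end_ ∧ -(arr.length : Int) ≤ start ∧ end_ < (arr.length : Int)
instance (arr : List Int) (start : Int) (end_ : Int) : Decidable (Pre_doubled_array_helper arr start end_) := by unfold Pre_doubled_array_helper; infer_instance

def pvWitness_doubled_array_helper : List Int × Int × Int := ([3, -1, 4], 0, 2)

def Spec_doubled_array_helper (arr : List Int) (start : Int) (end_ : Int) (out : List Int) : Prop := out = doubled_array_helper_alt arr start end_
instance (arr : List Int) (start : Int) (end_ : Int) (out : List Int) : Decidable (Spec_doubled_array_helper arr start end_ out) := by unfold Spec_doubled_array_helper; infer_instance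

-- ===== CLAIM (what is proved, stated in full; the proofs are below) =====
def Claim_equal_doubled_array_helper : Prop := ∀ (arr : List Int) (start : Int) (end_ : Int), Dom_doubled_array_helper arr start end_ → Pre_doubled_array_helper arr start end_ → Spec_doubled_array_helper arr start end_ (doubled_array_helper arr start end_)

-- ===== LEMMAS AND PROOFS =====

-- With start ≤ end_ and enough fuel, A's in-order recursion applies pvDblAt at
-- start, start+1, …, end_ — exactly B's fold over pyRange start (end_+1) 1.
theorem rec_eq_fold (fuel : Nat) : ∀ (arr : List Int) (start end_ : Int),
    start ≤ end_ → (end_ - start).toNat < fuel →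
    doubled_array_helper_rec arr start end_ fuel
      = (PySem.List.pyRange start (end_ + 1) 1).foldl pvDblAt arr := by
  induction fuel with
  | zero => intro _ _ _ _ h; omega
  | succ f ih =>
    intro arr start end_ hle hfuel
    by_cases h : start = end_
    · subst h
      simp [doubled_array_helper_rec, PySem.List.pyRange_one_singleton]
    · have hlt : start < end_ := lt_of_le_of_ne hle h
      simp only [doubled_array_helper_rec, if_neg h]
      rw [PySem.Int.floordiv_eq_ediv_of_pos (by omega)]
      rw [ih arr start ((start + end_) / 2) (by omega) (by omega),
          ih _ ((start + end_) / 2 + 1) end_ (by omega) (by omega),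
          ← List.foldl_append,
          ← PySem.List.pyRange_one_append start ((start + end_) / 2 + 1) (end_ + 1) (by omega) (by omega)]

-- B's loop applies pvDblAt at start+1, …, end_ after the initial pvDblAt at start — the same fold.
theorem while_eq_fold : ∀ (n : Nat) (arr : List Int) (start end_ : Int),
    (end_ - start).toNat = n →
    pvWhileDbl arr start end_
      = (PySem.List.pyRange (start + 1) (end_ + 1) 1).foldl pvDblAt arr := by
  intro n
  induction n with
  | zero =>
    intro arr start end_ hn
    rw [pvWhileDbl, if_neg (by omega), PySem.List.pyRange_one_eq_nil (by omega)]
    rfl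
  | succ k ih =>
    intro arr start end_ hn
    rw [PySem.List.pyRange_one_cons (show start + 1 < end_ + 1 by omega), List.foldl_cons,
        pvWhileDbl, if_pos (by omega),
        ih (pvDblAt arr (start + 1)) (start + 1) end_ (by omega)]

theorem alt_eq_fold (arr : List Int) (start end_ : Int) (hle : start ≤ end_) :
    doubled_array_helper_alt arr start end_
      = (PySem.List.pyRange start (end_ + 1) 1).foldl pvDblAt arr := by
  rw [doubled_array_helper_alt, while_eq_fold (end_ - start).toNat (pvDblAt arr start) start end_ rfl,
      PySem.List.pyRange_one_cons (show start < end_ + 1 by omega), List.foldl_cons]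

-- ===== VERDICT (by name: the statement is the Claim_ definition above) =====
theorem doubled_array_helper_spec : Claim_equal_doubled_array_helper := by
  intro arr start end_ _ hpre
  unfold Spec_doubled_array_helper doubled_array_helper
  rw [rec_eq_fold _ arr start end_ hpre.1 (by omega),
      alt_eq_fold arr start end_ hpre.1]
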